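-- pv_equiv track=rewrite | github.com/jatin-dot-py/ame-team | automation_matrix/processing/text/text_manipulation_1.py | add_marker_before_examples
-- ===== SOURCE A (Python) =====
-- def add_marker_before_examples(text):
--     lines = text.split('\n')
--     modified_lines = []
--
--     for line in lines:
--         if line.startswith('Example'):
--             modified_lines.append('---START EXAMPLE---')
--         modified_lines.append(line)
--     modified_text = '\n'.join(modified_lines)
--
--     return modified_text
-- ===== SOURCE B (Python) =====
-- def add_marker_before_examples(text):
--     # Single left-to-right character scan: track whether we are at a line start
--     # and splice the marker line in just before any 'Example' seen there.
--     out = []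
--     at_start = True
--     for idx in range(len(text)):
--         ch = text[idx]
--         if at_start and text.startswith('Example', idx):
--             out.append('---START EXAMPLE---\n')
--         out.append(ch)
--         at_start = ch == '\n'
--     return ''.join(out)
-- ===== Notes on version B (the rewrite author's own statement) =====
-- stated objective: alternative
-- what changed: Replaces A's split-into-lines / accumulate-marked-lines / join pipeline with a single left-to-right character scan that tracks line starts in a boolean and splices the marker string in place.
import Mathlib
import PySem

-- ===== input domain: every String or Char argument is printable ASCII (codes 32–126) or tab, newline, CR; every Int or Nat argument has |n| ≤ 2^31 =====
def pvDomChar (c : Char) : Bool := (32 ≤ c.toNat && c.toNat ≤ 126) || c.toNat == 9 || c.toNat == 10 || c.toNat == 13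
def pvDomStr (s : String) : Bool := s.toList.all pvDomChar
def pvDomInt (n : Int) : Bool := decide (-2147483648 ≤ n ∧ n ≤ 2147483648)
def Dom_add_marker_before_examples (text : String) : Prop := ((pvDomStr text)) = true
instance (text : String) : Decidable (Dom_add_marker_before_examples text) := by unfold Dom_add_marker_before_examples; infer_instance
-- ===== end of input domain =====

-- B replaces A's split/accumulate/join over lines by a single character scan that
-- tracks line starts and splices the marker in place (objective: alternative).

-- ===== PORT A =====
def add_marker_before_examples (text : String) : String :=
  let lines := (PySem.Str.split? text "\n").getD []
  let modified_lines := lines.foldl (fun acc line =>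
      if PySem.Str.startswith line "Example" then acc ++ ["---START EXAMPLE---", line]
      else acc ++ [line]) ([] : List String)
  PySem.Str.join "\n" modified_lines

-- ===== PORT B =====
-- one pass over the characters; `at_start` tracks line starts; text.startswith('Example', idx)
-- is `startswith` of the suffix starting at idx
def addMarkerGo (cs : List Char) (atStart : Bool) : List Char :=
  match cs with
  | [] => []
  | c :: rest =>
    (if atStart && PySem.Chars.startswith (c :: rest) "Example".toList
       then "---START EXAMPLE---\n".toList else []) ++ c :: addMarkerGo rest (c == '\n')

def add_marker_before_examples_alt (text : String) : String :=
  String.ofList (addMarkerGo text.toList true)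

-- ===== PRECONDITION & SPEC =====
def Spec_add_marker_before_examples (text : String) (out : String) : Prop := out = add_marker_before_examples_alt text
instance (text : String) (out : String) : Decidable (Spec_add_marker_before_examples text out) := by unfold Spec_add_marker_before_examples; infer_instance

-- ===== CLAIM (what is proved, stated in full; the proofs are below) =====
def Claim_equal_add_marker_before_examples : Prop := ∀ (text : String), Dom_add_marker_before_examples text → Spec_add_marker_before_examples text (add_marker_before_examples text)

-- ===== LEMMAS AND PROOFS =====

-- structural characterization of str.split('\n')
def mysplit : List Char → List (List Char)
  | [] => [[]]
  | c :: cs =>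
    if c = '\n' then [] :: mysplit cs
    else
      match mysplit cs with
      | [] => [[c]]
      | h :: t => (c :: h) :: t

-- per-line processing done by A's loop body
def procLine (l : List Char) : List (List Char) :=
  if PySem.Chars.startswith l "Example".toList then ["---START EXAMPLE---".toList, l] else [l]

lemma mysplit_ne_nil (cs : List Char) : mysplit cs ≠ [] := by
  induction cs with
  | nil => simp [mysplit]
  | cons c cs ih =>
    unfold mysplit
    split
    · simp
    · cases h : mysplit cs with
      | nil => simp
      | cons a t => simp

lemma go_spec (fuel : Nat) : ∀ (l cur : List Char) (acc : List (List Char)), l.length < fuel →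
    PySem.Chars.splitOn.go ['\n'] fuel l cur acc =
      acc.reverse ++ (match mysplit l with
        | [] => []
        | h :: t => (cur.reverse ++ h) :: t) := by
  induction fuel with
  | zero => intro l cur acc h; omega
  | succ fuel ih =>
    intro l cur acc h
    cases l with
    | nil =>
      simp [PySem.Chars.splitOn.go, mysplit]
    | cons c rest =>
      rw [PySem.Chars.splitOn.go]
      by_cases hc : c = '\n'
      · subst hc
        have hpre : List.isPrefixOf ['\n'] ('\n' :: rest) = true := by simp [List.isPrefixOf]
        rw [if_pos hpre]
        simp only [List.length_cons] at h
        simp only [List.length_cons, List.length_nil, List.drop_succ_cons, List.drop_zero]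
        rw [ih rest [] _ (by omega)]
        obtain ⟨hh, ht, hrest⟩ : ∃ hh ht, mysplit rest = hh :: ht := by
          cases hm : mysplit rest with
          | nil => exact absurd hm (mysplit_ne_nil rest)
          | cons a t => exact ⟨a, t, rfl⟩
        simp [mysplit, hrest]
      · have hpre : List.isPrefixOf ['\n'] (c :: rest) = false := by
          simp [List.isPrefixOf]; exact fun h' => absurd h'.symm hc
        rw [if_neg (by simp [hpre])]
        simp only [List.length_cons] at h
        rw [ih rest (c :: cur) acc (by omega)]
        obtain ⟨hh, ht, hrest⟩ : ∃ hh ht, mysplit rest = hh :: ht := by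
          cases hm : mysplit rest with
          | nil => exact absurd hm (mysplit_ne_nil rest)
          | cons a t => exact ⟨a, t, rfl⟩
        simp [mysplit, hc, hrest]

lemma splitOn_eq_mysplit (cs : List Char) :
    PySem.Chars.splitOn cs ['\n'] = mysplit cs := by
  unfold PySem.Chars.splitOn
  rw [go_spec (cs.length + 1) cs [] [] (by omega)]
  obtain ⟨hh, ht, hrest⟩ : ∃ hh ht, mysplit cs = hh :: ht := by
    cases hm : mysplit cs with
    | nil => exact absurd hm (mysplit_ne_nil cs)
    | cons a t => exact ⟨a, t, rfl⟩
  simp [hrest]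

lemma mysplit_nosep (l : List Char) (h : ∀ c ∈ l, c ≠ '\n') : mysplit l = [l] := by
  induction l with
  | nil => rfl
  | cons c l ih =>
    have hc : c ≠ '\n' := h c (by simp)
    have := ih (fun x hx => h x (by simp [hx]))
    simp [mysplit, hc, this]

lemma mysplit_append (l cs : List Char) (h : ∀ c ∈ l, c ≠ '\n') :
    mysplit (l ++ '\n' :: cs) = l :: mysplit cs := by
  induction l with
  | nil => simp [mysplit]
  | cons c l ih =>
    have hc : c ≠ '\n' := h c (by simp)
    have := ih (fun x hx => h x (by simp [hx]))
    simp [mysplit, hc, this]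

-- 'Example' contains no newline, so startswith at a line start ignores the rest of the text
lemma startswith_line (p : List Char) (hp : '\n' ∉ p) :
    ∀ (l rest : List Char), PySem.Chars.startswith (l ++ '\n' :: rest) p = PySem.Chars.startswith l p := by
  induction p with
  | nil => intro l rest; simp [PySem.Chars.startswith, List.isPrefixOf]
  | cons q p ih =>
    intro l rest
    have hq : q ≠ '\n' := by intro h; exact hp (by simp [h])
    cases l with
    | nil =>
      simp [PySem.Chars.startswith, List.isPrefixOf]
      intro h; exact absurd h hq
    | cons a l =>
      have := ih (by intro h; exact hp (by simp [h])) l rest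
      simp [PySem.Chars.startswith, List.isPrefixOf] at this ⊢
      rw [this]

lemma run_false (l : List Char) (h : ∀ c ∈ l, c ≠ '\n') (rest : List Char) :
    addMarkerGo (l ++ rest) false = l ++ addMarkerGo rest false := by
  induction l with
  | nil => rfl
  | cons c l ih =>
    have hc : c ≠ '\n' := h c (by simp)
    have heq := ih (fun x hx => h x (by simp [hx]))
    have hb : (c == '\n') = false := by simp [hc]
    simp [addMarkerGo, hb, heq]

lemma join_proc_cons (l : List Char) (L : List (List Char)) (hL : L ≠ []) :
    PySem.Chars.join ['\n'] (procLine l ++ L) =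
      (if PySem.Chars.startswith l "Example".toList
        then "---START EXAMPLE---\n".toList else []) ++ l ++ '\n' :: PySem.Chars.join ['\n'] L := by
  obtain ⟨y, t, rfl⟩ : ∃ y t, L = y :: t := by
    cases L with
    | nil => exact absurd rfl hL
    | cons y t => exact ⟨y, t, rfl⟩
  unfold procLine
  by_cases hs : PySem.Chars.startswith l "Example".toList = true
  · rw [if_pos hs, if_pos hs]
    simp only [List.cons_append, List.nil_append]
    rw [PySem.Chars.join_cons_cons, PySem.Chars.join_cons_cons]
    simp
  · rw [if_neg hs, if_neg hs]
    simp only [List.cons_append, List.nil_append]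
    rw [PySem.Chars.join_cons_cons]
    simp

lemma decomp (cs : List Char) :
    (∀ c ∈ cs, c ≠ '\n') ∨ ∃ l cs', (∀ c ∈ l, c ≠ '\n') ∧ cs = l ++ '\n' :: cs' := by
  induction cs with
  | nil => left; simp
  | cons c cs ih =>
    by_cases hc : c = '\n'
    · right; exact ⟨[], cs, by simp, by simp [hc]⟩
    · cases ih with
      | inl h => left; intro x hx; rcases List.mem_cons.mp hx with h1 | h2
                 · simpa [h1] using hc
                 · exact h x h2
      | inr h =>
        obtain ⟨l, cs', hl, heq⟩ := h
        right
        refine ⟨c :: l, cs', ?_, by simp [heq]⟩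
        intro x hx; rcases List.mem_cons.mp hx with h1 | h2
        · simpa [h1] using hc
        · exact hl x h2

lemma procLine_ne_nil (l : List Char) : procLine l ≠ [] := by
  unfold procLine; split <;> simp

lemma flatMap_proc_ne_nil (cs' : List Char) : (mysplit cs').flatMap procLine ≠ [] := by
  obtain ⟨hh, ht, hrest⟩ : ∃ hh ht, mysplit cs' = hh :: ht := by
    cases hm : mysplit cs' with
    | nil => exact absurd hm (mysplit_ne_nil cs')
    | cons a t => exact ⟨a, t, rfl⟩
  rw [hrest, List.flatMap_cons]
  intro h
  exact procLine_ne_nil hh (List.append_eq_nil_iff.mp h).1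

lemma addMarkerGo_cons (c : Char) (rest : List Char) (b : Bool) :
    addMarkerGo (c :: rest) b =
      (if b && PySem.Chars.startswith (c :: rest) "Example".toList
        then "---START EXAMPLE---\n".toList else []) ++ c :: addMarkerGo rest (c == '\n') := rfl

lemma main_char (n : Nat) : ∀ (cs : List Char), cs.length ≤ n →
    addMarkerGo cs true = PySem.Chars.join ['\n'] ((mysplit cs).flatMap procLine) := by
  induction n with
  | zero =>
    intro cs h
    have : cs = [] := List.eq_nil_of_length_eq_zero (by omega)
    subst this
    simp [addMarkerGo, mysplit, procLine, PySem.Chars.startswith,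
      PySem.Chars.join_singleton]
  | succ n ih =>
    intro cs hlen
    have hEx : '\n' ∉ "Example".toList := by decide
    rcases decomp cs with hfree | ⟨l, cs', hlfree, rfl⟩
    · -- no newline at all: a single line
      rw [mysplit_nosep cs hfree]
      cases cs with
      | nil =>
        simp [addMarkerGo, procLine, PySem.Chars.startswith,
          PySem.Chars.join_singleton]
      | cons c l' =>
        have hl'free : ∀ x ∈ l', x ≠ '\n' := fun x hx => hfree x (by simp [hx])
        have hc : c ≠ '\n' := hfree c (by simp)
        have hb : (c == '\n') = false := by simp [hc]
        have hrun := run_false l' hl'free []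
        simp only [List.append_nil] at hrun
        rw [addMarkerGo_cons, hb, hrun]
        simp only [addMarkerGo, List.append_nil, Bool.true_and, List.flatMap_cons,
          List.flatMap_nil, List.append_nil]
        unfold procLine
        by_cases hs : PySem.Chars.startswith (c :: l') "Example".toList = true
        · rw [if_pos hs, if_pos hs, PySem.Chars.join_cons_cons, PySem.Chars.join_singleton]
          simp
        · rw [if_neg hs, if_neg hs, PySem.Chars.join_singleton]
          simp
    · -- first line l, then a newline, then the rest cs'
      rw [mysplit_append l cs' hlfree]
      have hcs'len : cs'.length ≤ n := by
        have h1 : (l ++ '\n' :: cs').length = l.length + (cs'.length + 1) := by simp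
        omega
      have hIH := ih cs' hcs'len
      simp only [List.flatMap_cons]
      rw [join_proc_cons l _ (flatMap_proc_ne_nil cs'), ← hIH]
      have hstep : addMarkerGo ('\n' :: cs') false = '\n' :: addMarkerGo cs' true := by
        rw [addMarkerGo_cons]
        simp
      cases l with
      | nil =>
        simp only [List.nil_append]
        rw [addMarkerGo_cons]
        have hsw : PySem.Chars.startswith ('\n' :: cs') "Example".toList = false := by
          simp [PySem.Chars.startswith, List.isPrefixOf]
        rw [hsw]
        have h0 : PySem.Chars.startswith ([] : List Char) "Example".toList = false := by decide
        rw [h0]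
        simp
      | cons c l' =>
        have hl'free : ∀ x ∈ l', x ≠ '\n' := fun x hx => hlfree x (by simp [hx])
        have hc : c ≠ '\n' := hlfree c (by simp)
        have hb : (c == '\n') = false := by simp [hc]
        have hrun := run_false l' hl'free ('\n' :: cs')
        rw [List.cons_append, addMarkerGo_cons, hb, hrun, hstep]
        simp only [Bool.true_and]
        rw [show (c :: (l' ++ '\n' :: cs') : List Char) = (c :: l') ++ '\n' :: cs' from rfl,
          startswith_line "Example".toList hEx (c :: l') cs']
        by_cases hs : PySem.Chars.startswith (c :: l') "Example".toList = true
        · rw [if_pos hs]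
          simp
        · rw [if_neg hs]
          simp

lemma a_toList (text : String) :
    (add_marker_before_examples text).toList =
      PySem.Chars.join ['\n'] ((mysplit text.toList).flatMap procLine) := by
  unfold add_marker_before_examples
  have hsplit : PySem.Str.split? text "\n" =
      some ((mysplit text.toList).map String.ofList) := by
    unfold PySem.Str.split?
    rw [show PySem.Chars.split? text.toList "\n".toList
        = some (PySem.Chars.splitOn text.toList "\n".toList) from by
      unfold PySem.Chars.split?; rfl]
    rw [show ("\n".toList : List Char) = ['\n'] from rfl, splitOn_eq_mysplit]
    rfl
  rw [hsplit]
  simp only [Option.getD_some]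
  have hbody : (fun (acc : List String) (line : String) =>
      if PySem.Str.startswith line "Example" then acc ++ ["---START EXAMPLE---", line]
      else acc ++ [line])
    = fun acc line => acc ++ (if PySem.Str.startswith line "Example"
        then ["---START EXAMPLE---", line] else [line]) := by
    funext acc line
    exact (apply_ite (fun t => acc ++ t) _ _ _).symm
  rw [hbody, PySem.List.foldl_append_eq_flatMap]
  rw [PySem.Str.toList_join]
  simp only [List.nil_append]
  congr 1
  rw [List.map_flatMap, List.flatMap_map]
  congr 1
  funext l
  unfold procLine
  rw [PySem.Str.startswith_eq, String.toList_ofList]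
  by_cases hs : PySem.Chars.startswith l ['E', 'x', 'a', 'm', 'p', 'l', 'e'] = true <;> simp [hs]

-- ===== VERDICT (by name: the statement is the Claim_ definition above) =====
theorem add_marker_before_examples_spec : Claim_equal_add_marker_before_examples := by
  intro text _
  unfold Spec_add_marker_before_examples add_marker_before_examples_alt
  apply String.toList_inj.mp
  rw [a_toList, String.toList_ofList]
  exact (main_char text.toList.length text.toList le_rfl).symm
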